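-- pv_equiv track=rewrite | github.com/networkit/networkit | networkit/centrality.py | rankPerNode
-- ===== SOURCE A (Python) =====
-- def rankPerNode(ranking):
-- 	"""
-- 	Parameters
-- 	----------
--  	ranking: ordered list of tuples (node, score)
--
-- 	Returns
-- 	_______
-- 	for each node (sorted by node ID), the ranking of the node
--
-- 	"""
-- 	n_nodes = len(ranking)
-- 	ranking_id = [0]*n_nodes
-- 	for index, pair in enumerate(ranking):
-- 		ranking_id[pair[0]] = index
-- 	#we assign to all nodes the ranking of the first node with the same score
-- 	for index, pair in enumerate(ranking):
-- 			if index == 0: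
-- 				continue
-- 			if pair[1] == ranking[index-1][1]:
-- 				prev_node = ranking[index-1][0]
-- 				ranking_id[pair[0]] = ranking_id[prev_node]
-- 	return ranking_id
-- ===== SOURCE B (Python) =====
-- def rankPerNode(ranking):
--     result = [0] * len(ranking)
--     rank = 0
--     for index, pair in enumerate(ranking):
--         if index == 0 or pair[1] != ranking[index - 1][1]:
--             rank = index
--         result[pair[0]] = rank
--     return result
-- ===== Notes on version B (the rewrite author's own statement) =====
-- stated objective: simpler
-- what changed: Replaces A's two passes (assign every node its raw index, then overwrite tie groups by copying the previous node's stored rank) with a single pass that tracks the current group's leading rank in a running variable and writes each node's final rank once.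
-- outside the precondition, e.g. on rankPerNode([(0, 5), (0, 5)]): A returns [1, 0], B returns [0, 0]; on rankPerNode([(0, 1), (-2, 1)]): A returns [1, 0], B returns [0, 0]
import Mathlib
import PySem

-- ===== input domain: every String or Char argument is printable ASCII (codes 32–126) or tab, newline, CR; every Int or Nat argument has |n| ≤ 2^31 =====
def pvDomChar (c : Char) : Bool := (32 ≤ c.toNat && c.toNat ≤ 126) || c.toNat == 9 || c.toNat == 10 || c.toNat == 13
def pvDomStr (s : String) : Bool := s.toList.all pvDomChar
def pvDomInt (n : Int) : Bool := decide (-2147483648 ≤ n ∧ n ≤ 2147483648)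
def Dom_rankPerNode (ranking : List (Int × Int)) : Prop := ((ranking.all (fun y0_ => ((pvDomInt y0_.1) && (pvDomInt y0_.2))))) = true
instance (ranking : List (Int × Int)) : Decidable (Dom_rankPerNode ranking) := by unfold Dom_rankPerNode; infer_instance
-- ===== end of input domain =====

-- B replaces A's two passes (assign raw indices, then overwrite tie groups from the
-- previous node's stored rank) by one pass with a running current-group-rank variable;
-- same cost, simpler.

-- ===== PORT A =====
def rankPerNode (ranking : List (Int × Int)) : List Int :=
  let n_nodes := ranking.length
  let ranking_id : List Int := List.replicate n_nodes 0
  let ranking_id :=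
    (PySem.List.enumerate ranking 0).foldl
      (fun acc ip => PySem.List.pySetD acc ip.2.1 ip.1) ranking_id
  -- we assign to all nodes the ranking of the first node with the same score
  (PySem.List.enumerate ranking 0).foldl
    (fun acc ip =>
      if ip.1 == 0 then acc
      else if ip.2.2 == (PySem.List.pyGetD ranking (ip.1 - 1) (0, 0)).2 then
        let prev_node := (PySem.List.pyGetD ranking (ip.1 - 1) (0, 0)).1
        PySem.List.pySetD acc ip.2.1 (PySem.List.pyGetD acc prev_node 0)
      else acc) ranking_id

-- ===== PORT B =====
def rankPerNode_alt (ranking : List (Int × Int)) : List Int :=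
  let result : List Int := List.replicate ranking.length 0
  ((PySem.List.enumerate ranking 0).foldl
    (fun st ip =>
      let rank :=
        if ip.1 == 0 || !(ip.2.2 == (PySem.List.pyGetD ranking (ip.1 - 1) (0, 0)).2)
        then ip.1 else st.2
      (PySem.List.pySetD st.1 ip.2.1 rank, rank))
    (result, 0)).1

-- ===== PRECONDITION & SPEC =====
-- pvEff: the effective (Python-wrapped) list index a node id addresses
def pvEff (n : Nat) (i : Int) : Nat := (if i < 0 then i + n else i).toNat
-- Pre_ excludes node ids outside [-n, n), where A raises IndexError, and lists that BOTH have
-- adjacent equal scores AND have two entries addressing the same effective result slot, where the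
-- surviving value is an accident of A's two-pass overwrite order.
def Pre_rankPerNode (ranking : List (Int × Int)) : Prop :=
  (∀ p ∈ ranking, -(ranking.length : Int) ≤ p.1 ∧ p.1 < (ranking.length : Int)) ∧
  ((ranking.map (fun p => pvEff ranking.length p.1)).Nodup ∨
    List.IsChain (fun p q => p.2 ≠ q.2) ranking)
instance (ranking : List (Int × Int)) : Decidable (Pre_rankPerNode ranking) := by
  unfold Pre_rankPerNode; infer_instance
def pvWitness_rankPerNode : (List (Int × Int)) := [(1, 9), (0, 9), (2, 7), (-1, 7)]
def Spec_rankPerNode (ranking : List (Int × Int)) (out : List Int) : Prop := out = rankPerNode_alt ranking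
instance (ranking : List (Int × Int)) (out : List Int) : Decidable (Spec_rankPerNode ranking out) := by unfold Spec_rankPerNode; infer_instance

-- ===== CLAIM (what is proved, stated in full; the proofs are below) =====
def Claim_equal_rankPerNode : Prop := ∀ (ranking : List (Int × Int)), Dom_rankPerNode ranking → Pre_rankPerNode ranking → Spec_rankPerNode ranking (rankPerNode ranking)

-- ===== LEMMAS AND PROOFS =====

-- position / score / shared-rank of the entry at index k
def pvPos (rs : List (Int × Int)) (k : Nat) : Nat := pvEff rs.length (rs.getD k (0, 0)).1
def pvSc (rs : List (Int × Int)) (k : Nat) : Int := (rs.getD k (0, 0)).2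
def pvRank (rs : List (Int × Int)) : Nat → Int
  | 0 => 0
  | (k+1) => if pvSc rs (k+1) = pvSc rs k then pvRank rs k else ((k : Int) + 1)

theorem pySetD_eff (acc : List Int) (i : Int) (v : Int) (h1 : -(acc.length:Int) ≤ i) (h2 : i < (acc.length:Int)) :
    PySem.List.pySetD acc i v = acc.set (pvEff acc.length i) v := by
  by_cases h : 0 ≤ i
  · simp [PySem.List.pySetD, PySem.List.pySet?, PySem.List.pyIdx?, h, h2, pvEff, if_neg (by omega : ¬ i < 0)]
  · simp only [PySem.List.pySetD, PySem.List.pySet?, PySem.List.pyIdx?, if_neg h, if_pos h1,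
      Option.map_some, Option.getD_some, pvEff, if_pos (by omega : i < 0)]
    congr 1
    omega

theorem pyGetD_eff (acc : List Int) (i : Int) (d : Int) (h1 : -(acc.length:Int) ≤ i) (h2 : i < (acc.length:Int)) :
    PySem.List.pyGetD acc i d = acc.getD (pvEff acc.length i) d := by
  by_cases h : i < 0
  · simp only [PySem.List.pyGetD, PySem.List.pyGet?, PySem.List.pyIdx?, if_neg (by omega : ¬ 0 ≤ i),
      if_pos h1, Option.bind_some, pvEff, if_pos h, List.getD_eq_getElem?_getD]
    congr 2
    omega
  · simp only [PySem.List.pyGetD, PySem.List.pyGet?, PySem.List.pyIdx?, if_pos (by omega : 0 ≤ i),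
      if_pos (by omega : i < (acc.length:Int)), Option.bind_some, pvEff, if_neg h,
      List.getD_eq_getElem?_getD]

theorem getD_set_self (l : List Int) (q : Nat) (v : Int) (h : q < l.length) :
    (l.set q v).getD q 0 = v := by
  simp [List.getD_eq_getElem?_getD, h]

theorem getD_set_ne (l : List Int) (q q' : Nat) (v : Int) (h : q' ≠ q) :
    (l.set q v).getD q' 0 = l.getD q' 0 := by
  simp [List.getD_eq_getElem?_getD, List.getElem?_set_ne (by omega : q ≠ q')]

theorem pvPos_lt (rs : List (Int × Int))
    (hR : ∀ p ∈ rs, -(rs.length : Int) ≤ p.1 ∧ p.1 < (rs.length : Int))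
    (k : Nat) (hk : k < rs.length) : pvPos rs k < rs.length := by
  have hmem : rs[k] ∈ rs := List.getElem_mem hk
  have := hR rs[k] hmem
  simp only [pvPos, pvEff, List.getD_eq_getElem rs (0,0) hk]
  omega

theorem pvPos_inj (rs : List (Int × Int))
    (hN : (rs.map (fun p => pvEff rs.length p.1)).Nodup)
    {k k' : Nat} (hk : k < rs.length) (hk' : k' < rs.length)
    (h : pvPos rs k = pvPos rs k') : k = k' := by
  have e : ∀ j (hj : j < rs.length), pvPos rs j = (rs.map (fun p => pvEff rs.length p.1))[j]'(by simpa) := by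
    intro j hj
    simp [pvPos, List.getD_eq_getElem?_getD, List.getElem?_eq_getElem hj]
  rw [e k hk, e k' hk'] at h
  exact (hN.getElem_inj_iff.mp h)

-- fold of A's first pass / second pass and of B's pass, started at entry m
def pvFold1 (rs : List (Int × Int)) (m : Nat) (acc : List Int) : List Int :=
  (PySem.List.enumerate (rs.drop m) (m : Int)).foldl
    (fun acc ip => PySem.List.pySetD acc ip.2.1 ip.1) acc

def pvFold2 (rs : List (Int × Int)) (m : Nat) (acc : List Int) : List Int :=
  (PySem.List.enumerate (rs.drop m) (m : Int)).foldl
    (fun acc ip =>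
      if ip.1 == 0 then acc
      else if ip.2.2 == (PySem.List.pyGetD rs (ip.1 - 1) (0, 0)).2 then
        let prev_node := (PySem.List.pyGetD rs (ip.1 - 1) (0, 0)).1
        PySem.List.pySetD acc ip.2.1 (PySem.List.pyGetD acc prev_node 0)
      else acc) acc

def pvFoldB (rs : List (Int × Int)) (m : Nat) (st : List Int × Int) : List Int × Int :=
  (PySem.List.enumerate (rs.drop m) (m : Int)).foldl
    (fun st ip =>
      let rank :=
        if ip.1 == 0 || !(ip.2.2 == (PySem.List.pyGetD rs (ip.1 - 1) (0, 0)).2)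
        then ip.1 else st.2
      (PySem.List.pySetD st.1 ip.2.1 rank, rank)) st

theorem pvFold1_nil (rs : List (Int × Int)) (m : Nat) (acc : List Int) (h : rs.length ≤ m) :
    pvFold1 rs m acc = acc := by
  simp [pvFold1, List.drop_eq_nil_of_le h]

theorem pvFold2_nil (rs : List (Int × Int)) (m : Nat) (acc : List Int) (h : rs.length ≤ m) :
    pvFold2 rs m acc = acc := by
  simp [pvFold2, List.drop_eq_nil_of_le h]

theorem pvFoldB_nil (rs : List (Int × Int)) (m : Nat) (st : List Int × Int) (h : rs.length ≤ m) :
    pvFoldB rs m st = st := by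
  simp [pvFoldB, List.drop_eq_nil_of_le h]

theorem pvFold1_cons (rs : List (Int × Int)) (m : Nat) (acc : List Int) (h : m < rs.length) :
    pvFold1 rs m acc = pvFold1 rs (m+1) (PySem.List.pySetD acc rs[m].1 (m : Int)) := by
  rw [pvFold1, List.drop_eq_getElem_cons h, PySem.List.enumerate_cons, List.foldl_cons, pvFold1]
  norm_num

theorem pvFold2_cons (rs : List (Int × Int)) (m : Nat) (acc : List Int) (h : m < rs.length) :
    pvFold2 rs m acc = pvFold2 rs (m+1)
      (if ((m : Int) == 0) then acc
       else if rs[m].2 == (PySem.List.pyGetD rs ((m : Int) - 1) (0, 0)).2 then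
         PySem.List.pySetD acc rs[m].1
           (PySem.List.pyGetD acc (PySem.List.pyGetD rs ((m : Int) - 1) (0, 0)).1 0)
       else acc) := by
  rw [pvFold2, List.drop_eq_getElem_cons h, PySem.List.enumerate_cons, List.foldl_cons, pvFold2]
  norm_num

theorem pvFoldB_cons (rs : List (Int × Int)) (m : Nat) (st : List Int × Int) (h : m < rs.length) :
    pvFoldB rs m st = pvFoldB rs (m+1)
      (let rank :=
        if ((m : Int) == 0) || !(rs[m].2 == (PySem.List.pyGetD rs ((m : Int) - 1) (0, 0)).2)
        then (m : Int) else st.2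
       (PySem.List.pySetD st.1 rs[m].1 rank, rank)) := by
  rw [pvFoldB, List.drop_eq_getElem_cons h, PySem.List.enumerate_cons, List.foldl_cons, pvFoldB]
  norm_num

theorem pass1 (rs : List (Int × Int))
    (hR : ∀ p ∈ rs, -(rs.length : Int) ≤ p.1 ∧ p.1 < (rs.length : Int))
    (hN : (rs.map (fun p => pvEff rs.length p.1)).Nodup) :
    ∀ (fuel m : Nat) (acc : List Int), rs.length - m = fuel → acc.length = rs.length →
    (pvFold1 rs m acc).length = rs.length ∧
    (∀ k, m ≤ k → k < rs.length → (pvFold1 rs m acc).getD (pvPos rs k) 0 = (k : Int)) ∧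
    (∀ q : Nat, (∀ k, m ≤ k → k < rs.length → pvPos rs k ≠ q) →
      (pvFold1 rs m acc).getD q 0 = acc.getD q 0) := by
  intro fuel
  induction fuel with
  | zero =>
    intro m acc hf hlen
    rw [pvFold1_nil _ _ _ (by omega)]
    exact ⟨hlen, fun k hk1 hk2 => by exfalso; omega, fun q _ => rfl⟩
  | succ fuel ih =>
    intro m acc hf hlen
    have hm : m < rs.length := by omega
    have hb := hR rs[m] (List.getElem_mem hm)
    have hset : PySem.List.pySetD acc rs[m].1 (m : Int) = acc.set (pvPos rs m) (m : Int) := by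
      rw [pySetD_eff acc rs[m].1 (m : Int) (by rw [hlen]; exact hb.1) (by rw [hlen]; exact hb.2)]
      congr 1
      simp [pvPos, hlen, List.getD_eq_getElem?_getD, List.getElem?_eq_getElem hm]
    rw [pvFold1_cons _ _ _ hm, hset]
    have hlen' : (acc.set (pvPos rs m) (m : Int)).length = rs.length := by
      simp [hlen]
    obtain ⟨ih1, ih2, ih3⟩ := ih (m+1) _ (by omega) hlen'
    refine ⟨ih1, ?_, ?_⟩
    · intro k hk1 hk2
      rcases Nat.eq_or_lt_of_le hk1 with rfl | hlt
      · rw [ih3 (pvPos rs m) (fun k' hk1' hk2' hne =>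
          absurd (pvPos_inj rs hN hk2' hk2 hne) (by omega))]
        exact getD_set_self _ _ _ (by rw [hlen]; exact pvPos_lt rs hR m hk2)
      · exact ih2 k hlt hk2
    · intro q hq
      rw [ih3 q (fun k hk1 hk2 => hq k (by omega) hk2)]
      exact getD_set_ne _ _ _ _ (Ne.symm (hq m (le_refl m) hm))

theorem set_getD_self (l : List Int) (q : Nat) (v : Int) (hq : q < l.length) (h : l.getD q 0 = v) :
    l.set q v = l := by
  rw [List.getD_eq_getElem l 0 hq] at h
  rw [← h]
  exact List.set_getElem_self hq

theorem pvSc_eq (rs : List (Int × Int)) (k : Nat) (hk : k < rs.length) : pvSc rs k = rs[k].2 := by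
  simp [pvSc, List.getD_eq_getElem?_getD, List.getElem?_eq_getElem hk]

theorem pvPrev_eq (rs : List (Int × Int)) (m' : Nat) (hm : m' < rs.length) :
    PySem.List.pyGetD rs ((↑(m'+1) : Int) - 1) (0, 0) = rs[m'] := by
  have hc : ((m'+1 : Nat) : Int) - 1 = ((m' : Nat) : Int) := by push_cast; ring
  rw [hc, PySem.List.pyGetD_natCast]
  exact List.getD_eq_getElem rs (0,0) hm

theorem pvSetD_eq (rs : List (Int × Int))
    (hR : ∀ p ∈ rs, -(rs.length : Int) ≤ p.1 ∧ p.1 < (rs.length : Int))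
    (m : Nat) (hm : m < rs.length) (acc : List Int) (hlen : acc.length = rs.length) (v : Int) :
    PySem.List.pySetD acc rs[m].1 v = acc.set (pvPos rs m) v := by
  have hb := hR rs[m] (List.getElem_mem hm)
  rw [pySetD_eff acc rs[m].1 v (by rw [hlen]; exact hb.1) (by rw [hlen]; exact hb.2)]
  congr 1
  simp [pvPos, hlen, List.getD_eq_getElem?_getD, List.getElem?_eq_getElem hm]

theorem pvGetD_eq (rs : List (Int × Int))
    (hR : ∀ p ∈ rs, -(rs.length : Int) ≤ p.1 ∧ p.1 < (rs.length : Int))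
    (m : Nat) (hm : m < rs.length) (acc : List Int) (hlen : acc.length = rs.length) :
    PySem.List.pyGetD acc rs[m].1 0 = acc.getD (pvPos rs m) 0 := by
  have hb := hR rs[m] (List.getElem_mem hm)
  rw [pyGetD_eff acc rs[m].1 0 (by rw [hlen]; exact hb.1) (by rw [hlen]; exact hb.2)]
  congr 1
  simp [pvPos, hlen, List.getD_eq_getElem?_getD, List.getElem?_eq_getElem hm]

theorem pass2 (rs : List (Int × Int))
    (hR : ∀ p ∈ rs, -(rs.length : Int) ≤ p.1 ∧ p.1 < (rs.length : Int))
    (hN : (rs.map (fun p => pvEff rs.length p.1)).Nodup) :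
    ∀ (fuel m : Nat) (acc : List Int), rs.length - m = fuel → 1 ≤ m → acc.length = rs.length →
    (∀ k, k < m → acc.getD (pvPos rs k) 0 = pvRank rs k) →
    (∀ k, m ≤ k → k < rs.length → acc.getD (pvPos rs k) 0 = (k : Int)) →
    (pvFold2 rs m acc).length = rs.length ∧
    (∀ k, k < rs.length → (pvFold2 rs m acc).getD (pvPos rs k) 0 = pvRank rs k) ∧
    (∀ q : Nat, (∀ k, m ≤ k → k < rs.length → pvPos rs k ≠ q) →
      (pvFold2 rs m acc).getD q 0 = acc.getD q 0) := by
  intro fuel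
  induction fuel with
  | zero =>
    intro m acc hf _ hlen inv1 _
    rw [pvFold2_nil _ _ _ (by omega)]
    exact ⟨hlen, fun k hk => inv1 k (by omega), fun q _ => rfl⟩
  | succ fuel ih =>
    intro m acc hf hm1 hlen inv1 inv2
    have hm : m < rs.length := by omega
    obtain ⟨m', rfl⟩ : ∃ m', m = m' + 1 := ⟨m - 1, by omega⟩
    have hm' : m' < rs.length := by omega
    have hstep : (if ((↑(m'+1) : Int) == 0) then acc
        else if rs[m'+1].2 == (PySem.List.pyGetD rs ((↑(m'+1) : Int) - 1) (0, 0)).2 then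
          PySem.List.pySetD acc rs[m'+1].1
            (PySem.List.pyGetD acc (PySem.List.pyGetD rs ((↑(m'+1) : Int) - 1) (0, 0)).1 0)
        else acc) = acc.set (pvPos rs (m'+1)) (pvRank rs (m'+1)) := by
      rw [if_neg (by simp; omega), pvPrev_eq rs m' hm']
      by_cases hsc : pvSc rs (m'+1) = pvSc rs m'
      · rw [if_pos (by rw [← pvSc_eq rs (m'+1) hm, ← pvSc_eq rs m' hm']; exact beq_iff_eq.mpr hsc)]
        rw [pvGetD_eq rs hR m' hm' acc hlen, inv1 m' (by omega),
          pvSetD_eq rs hR (m'+1) hm acc hlen]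
        congr 1
        simp [pvRank, hsc]
      · rw [if_neg (by rw [← pvSc_eq rs (m'+1) hm, ← pvSc_eq rs m' hm']; simpa using hsc)]
        refine (set_getD_self acc (pvPos rs (m'+1)) (pvRank rs (m'+1))
          (by rw [hlen]; exact pvPos_lt rs hR (m'+1) hm) ?_).symm
        rw [inv2 (m'+1) (le_refl _) hm]
        simp [pvRank, hsc]
    rw [pvFold2_cons _ _ _ hm, hstep]
    have hlen' : (acc.set (pvPos rs (m'+1)) (pvRank rs (m'+1))).length = rs.length := by
      simp [hlen]
    have inv1' : ∀ k, k < m'+1+1 →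
        (acc.set (pvPos rs (m'+1)) (pvRank rs (m'+1))).getD (pvPos rs k) 0 = pvRank rs k := by
      intro k hk
      rcases Nat.lt_or_ge k (m'+1) with hlt | hge
      · rw [getD_set_ne _ _ _ _ (fun he => absurd (pvPos_inj rs hN (by omega) hm he) (by omega))]
        exact inv1 k hlt
      · have hke : k = m'+1 := by omega
        rw [hke]
        exact getD_set_self _ _ _ (by rw [hlen]; exact pvPos_lt rs hR (m'+1) hm)
    have inv2' : ∀ k, m'+1+1 ≤ k → k < rs.length →
        (acc.set (pvPos rs (m'+1)) (pvRank rs (m'+1))).getD (pvPos rs k) 0 = (k : Int) := by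
      intro k hk1 hk2
      rw [getD_set_ne _ _ _ _ (fun he => absurd (pvPos_inj rs hN hk2 hm he) (by omega))]
      exact inv2 k (by omega) hk2
    obtain ⟨ih1, ih2, ih3⟩ := ih (m'+1+1) _ (by omega) (by omega) hlen' inv1' inv2'
    refine ⟨ih1, ih2, ?_⟩
    · intro q hq
      rw [ih3 q (fun k hk1 hk2 => hq k (by omega) hk2)]
      exact getD_set_ne _ _ _ _ (Ne.symm (hq (m'+1) (le_refl _) hm))

theorem passB (rs : List (Int × Int))
    (hR : ∀ p ∈ rs, -(rs.length : Int) ≤ p.1 ∧ p.1 < (rs.length : Int))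
    (hN : (rs.map (fun p => pvEff rs.length p.1)).Nodup) :
    ∀ (fuel m : Nat) (acc : List Int) (rv : Int), rs.length - m = fuel → 1 ≤ m → m ≤ rs.length → acc.length = rs.length →
    rv = pvRank rs (m-1) →
    (∀ k, k < m → acc.getD (pvPos rs k) 0 = pvRank rs k) →
    (∀ q : Nat, q < rs.length → (∀ k, k < m → pvPos rs k ≠ q) → acc.getD q 0 = 0) →
    (pvFoldB rs m (acc, rv)).1.length = rs.length ∧
    (∀ k, k < rs.length → (pvFoldB rs m (acc, rv)).1.getD (pvPos rs k) 0 = pvRank rs k) ∧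
    (∀ q : Nat, q < rs.length → (∀ k, k < rs.length → pvPos rs k ≠ q) →
      (pvFoldB rs m (acc, rv)).1.getD q 0 = 0) := by
  intro fuel
  induction fuel with
  | zero =>
    intro m acc rv hf _ hmn hlen _ inv1 inv0
    rw [pvFoldB_nil _ _ _ (by omega)]
    exact ⟨hlen, fun k hk => inv1 k (by omega), fun q hq h0 => inv0 q hq (fun k hk => h0 k (by omega))⟩
  | succ fuel ih =>
    intro m acc rv hf hm1 _ hlen hrv inv1 inv0
    have hm : m < rs.length := by omega
    obtain ⟨m', rfl⟩ : ∃ m', m = m' + 1 := ⟨m - 1, by omega⟩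
    have hm' : m' < rs.length := by omega
    have hrank : (if ((↑(m'+1) : Int) == 0) || !(rs[m'+1].2 == (PySem.List.pyGetD rs ((↑(m'+1) : Int) - 1) (0, 0)).2)
        then ((m'+1 : Nat) : Int) else rv) = pvRank rs (m'+1) := by
      rw [pvPrev_eq rs m' hm']
      have hz : (((m'+1 : Nat) : Int) == 0) = false := by simp; omega
      by_cases hsc : pvSc rs (m'+1) = pvSc rs m'
      · have hb : (rs[m'+1].2 == rs[m'].2) = true := by
          rw [← pvSc_eq rs (m'+1) hm, ← pvSc_eq rs m' hm']; exact beq_iff_eq.mpr hsc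
        rw [hz, hb, hrv]
        simp [pvRank, hsc]
      · have hb : (rs[m'+1].2 == rs[m'].2) = false := by
          rw [← pvSc_eq rs (m'+1) hm, ← pvSc_eq rs m' hm']; simpa using hsc
        rw [hz, hb]
        simp [pvRank, hsc]
    rw [pvFoldB_cons _ _ _ hm]
    simp only [hrank, pvSetD_eq rs hR (m'+1) hm acc hlen]
    have hlen' : (acc.set (pvPos rs (m'+1)) (pvRank rs (m'+1))).length = rs.length := by
      simp [hlen]
    have inv1' : ∀ k, k < m'+1+1 →
        (acc.set (pvPos rs (m'+1)) (pvRank rs (m'+1))).getD (pvPos rs k) 0 = pvRank rs k := by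
      intro k hk
      rcases Nat.lt_or_ge k (m'+1) with hlt | hge
      · rw [getD_set_ne _ _ _ _ (fun he => absurd (pvPos_inj rs hN (by omega) hm he) (by omega))]
        exact inv1 k hlt
      · have hke : k = m'+1 := by omega
        rw [hke]
        exact getD_set_self _ _ _ (by rw [hlen]; exact pvPos_lt rs hR (m'+1) hm)
    have inv0' : ∀ q : Nat, q < rs.length → (∀ k, k < m'+1+1 → pvPos rs k ≠ q) →
        (acc.set (pvPos rs (m'+1)) (pvRank rs (m'+1))).getD q 0 = 0 := by
      intro q hq h0
      rw [getD_set_ne _ _ _ _ (Ne.symm (h0 (m'+1) (by omega)))]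
      exact inv0 q hq (fun k hk => h0 k (by omega))
    obtain ⟨ih1, ih2, ih3⟩ := ih (m'+1+1) _ (pvRank rs (m'+1)) (by omega) (by omega) (by omega) hlen'
      (by simp) inv1' inv0'
    exact ⟨ih1, ih2, ih3⟩

-- ===== VERDICT (by name: the statement is the Claim_ definition above) =====
theorem getD_replicate_zero (n q : Nat) : (List.replicate n (0 : Int)).getD q 0 = 0 := by
  simp [List.getD_eq_getElem?_getD, List.getElem?_replicate]
  split_ifs <;> rfl

theorem passNT (rs : List (Int × Int))
    (hT : ∀ k, 1 ≤ k → k < rs.length → pvSc rs k ≠ pvSc rs (k-1)) :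
    ∀ (fuel m : Nat) (acc : List Int) (rv : Int), rs.length - m = fuel →
    pvFold2 rs m acc = acc ∧ (pvFoldB rs m (acc, rv)).1 = pvFold1 rs m acc := by
  intro fuel
  induction fuel with
  | zero =>
    intro m acc rv hf
    rw [pvFold2_nil _ _ _ (by omega), pvFoldB_nil _ _ _ (by omega), pvFold1_nil _ _ _ (by omega)]
    exact ⟨rfl, rfl⟩
  | succ fuel ih =>
    intro m acc rv hf
    have hm : m < rs.length := by omega
    have hcond : ((m : Int) == 0) = true ∨
        (rs[m].2 == (PySem.List.pyGetD rs ((m : Int) - 1) (0, 0)).2) = false := by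
      rcases Nat.eq_zero_or_pos m with rfl | hm1
      · left; simp
      · right
        obtain ⟨m', rfl⟩ : ∃ m', m = m' + 1 := ⟨m - 1, by omega⟩
        rw [pvPrev_eq rs m' (by omega)]
        have := hT (m'+1) (by omega) hm
        rw [pvSc_eq rs (m'+1) hm, pvSc_eq rs (m'+1-1) (by omega)] at this
        simpa using this
    constructor
    · rw [pvFold2_cons _ _ _ hm]
      have hst : (if ((m : Int) == 0) then acc
          else if rs[m].2 == (PySem.List.pyGetD rs ((m : Int) - 1) (0, 0)).2 then
            PySem.List.pySetD acc rs[m].1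
              (PySem.List.pyGetD acc (PySem.List.pyGetD rs ((m : Int) - 1) (0, 0)).1 0)
          else acc) = acc := by
        rcases hcond with h | h
        · simp [h]
        · simp [h]
      rw [hst]
      exact (ih (m+1) acc rv (by omega)).1
    · rw [pvFoldB_cons _ _ _ hm, pvFold1_cons _ _ _ hm]
      have hrk : (if ((m : Int) == 0) || !(rs[m].2 == (PySem.List.pyGetD rs ((m : Int) - 1) (0, 0)).2)
          then (m : Int) else rv) = (m : Int) := by
        rcases hcond with h | h
        · simp [h]
        · simp [h]
      simp only [hrk]
      exact (ih (m+1) _ _ (by omega)).2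

theorem rankPerNode_spec : Claim_equal_rankPerNode := by
  intro rs _ hpre
  obtain ⟨hR, hOr⟩ := hpre
  show rankPerNode rs = rankPerNode_alt rs
  rcases hOr with hN | hC
  case inr =>
    have hT : ∀ k, 1 ≤ k → k < rs.length → pvSc rs k ≠ pvSc rs (k-1) := by
      intro k hk1 hk2
      obtain ⟨k', rfl⟩ : ∃ k', k = k' + 1 := ⟨k - 1, by omega⟩
      have := List.isChain_iff_getElem.mp hC k' (by omega)
      rw [pvSc_eq rs (k'+1) hk2, pvSc_eq rs (k'+1-1) (by omega)]
      exact fun he => this he.symm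
    obtain ⟨h2, hBf⟩ := passNT rs hT rs.length 0 (List.replicate rs.length 0) 0 (by omega)
    show pvFold2 rs 0 (pvFold1 rs 0 (List.replicate rs.length 0)) =
      (pvFoldB rs 0 (List.replicate rs.length 0, 0)).1
    rw [hBf, (passNT rs hT rs.length 0 (pvFold1 rs 0 (List.replicate rs.length 0)) 0 (by omega)).1]
  case inl =>
  by_cases hnil : rs = []
  case pos => subst hnil; rfl
  case neg =>
    have hn : 0 < rs.length := List.length_pos_iff.mpr hnil
    have hA : rankPerNode rs = pvFold2 rs 0 (pvFold1 rs 0 (List.replicate rs.length 0)) := rfl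
    have hB : rankPerNode_alt rs = (pvFoldB rs 0 (List.replicate rs.length 0, 0)).1 := rfl
    have hrepl : (List.replicate rs.length (0 : Int)).length = rs.length := by simp
    obtain ⟨p1len, p1val, p1un⟩ :=
      pass1 rs hR hN rs.length 0 (List.replicate rs.length 0) (by omega) hrepl
    -- A: skip index 0 of the second pass, then pass2 from index 1
    have hA2 : pvFold2 rs 0 (pvFold1 rs 0 (List.replicate rs.length 0)) =
        pvFold2 rs 1 (pvFold1 rs 0 (List.replicate rs.length 0)) := by
      rw [pvFold2_cons rs 0 _ hn]
      norm_num
    obtain ⟨a_len, a_val, a_un⟩ := pass2 rs hR hN (rs.length - 1) 1 _ (by omega) (le_refl 1) p1len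
      (fun k hk => by
        have hk0 : k = 0 := by omega
        rw [hk0]
        simpa [pvRank] using p1val 0 (by omega) (by omega))
      (fun k hk1 hk2 => p1val k (by omega) hk2)
    -- B: index 0 writes rank 0, then passB from index 1
    have hB2 : pvFoldB rs 0 (List.replicate rs.length 0, 0) =
        pvFoldB rs 1 ((List.replicate rs.length 0).set (pvPos rs 0) 0, 0) := by
      rw [pvFoldB_cons rs 0 _ hn]
      simp only []
      norm_num [pvSetD_eq rs hR 0 hn (List.replicate rs.length 0) hrepl]
    obtain ⟨b_len, b_val, b_un⟩ := passB rs hR hN (rs.length - 1) 1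
      ((List.replicate rs.length 0).set (pvPos rs 0) 0) 0 (by omega) (le_refl 1) (by omega)
      (by simp) (by simp [pvRank])
      (fun k hk => by
        have hk0 : k = 0 := by omega
        rw [hk0]
        simp only [pvRank]
        exact getD_set_self _ _ _ (by rw [hrepl]; exact pvPos_lt rs hR 0 hn))
      (fun q hq h0 => by
        rw [getD_set_ne _ _ _ _ (Ne.symm (h0 0 (by omega)))]
        exact getD_replicate_zero _ _)
    rw [hA, hA2, hB, hB2]
    apply List.ext_getElem (by rw [a_len, b_len])
    intro i hi1 hi2
    have hi : i < rs.length := by rw [← a_len]; exact hi1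
    rw [← List.getD_eq_getElem _ 0 hi1, ← List.getD_eq_getElem _ 0 hi2]
    by_cases hex : ∃ k, k < rs.length ∧ pvPos rs k = i
    · obtain ⟨k, hk, hpk⟩ := hex
      rw [← hpk, a_val k hk, b_val k hk]
    · rw [not_exists] at hex
      simp only [not_and] at hex
      rw [a_un i (fun k hk1 hk2 => hex k hk2), b_un i hi (fun k hk => hex k hk)]
      rw [p1un i (fun k hk1 hk2 => hex k hk2)]
      exact getD_replicate_zero _ _
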